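-- pv_equiv track=rewrite | github.com/devgomesai/DSA | Leetcode-Python/remove_adjacent_target_groups.py | remove_adjacent_target_groups
-- ===== SOURCE A (Python) =====
-- def remove_adjacent_target_groups(s: str, target: int) -> str:
--     while True:
--         stack = []
--         i = 0
--         changed = False
--
--         while i < len(s):
--             j = i
--             while j < len(s) and s[j] == s[i]:
--                 j += 1
--             count = j - i
--
--             if count == target:
--                 changed = True  # A removal has occurred
--             else:
--                 stack.append(s[i:j])
--
--             i = j
--
--         s = ''.join(stack)
--         if not changed:
--             break
--
--     return s
-- ===== SOURCE B (Python) =====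
-- def remove_adjacent_target_groups(s: str, target: int) -> str:
--     # Run-length encode once, then do all removal passes on (char, count) runs.
--     runs = []
--     for c in s:
--         if runs and runs[-1][0] == c:
--             runs[-1] = (c, runs[-1][1] + 1)
--         else:
--             runs.append((c, 1))
--     while True:
--         kept = [r for r in runs if r[1] != target]
--         if len(kept) == len(runs):
--             break
--         merged = []
--         for c, k in kept:
--             if merged and merged[-1][0] == c:
--                 merged[-1] = (c, merged[-1][1] + k)
--             else:
--                 merged.append((c, k))
--         runs = merged
--     return ''.join(c * k for c, k in runs)
-- ===== Notes on version B (the rewrite author's own statement) =====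
-- stated objective: faster
-- what changed: A rescans the whole string character by character on every removal pass; B run-length-encodes the string once and then performs all removal passes on the (char,count) run list, rebuilding the string only at the end.
import Mathlib
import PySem

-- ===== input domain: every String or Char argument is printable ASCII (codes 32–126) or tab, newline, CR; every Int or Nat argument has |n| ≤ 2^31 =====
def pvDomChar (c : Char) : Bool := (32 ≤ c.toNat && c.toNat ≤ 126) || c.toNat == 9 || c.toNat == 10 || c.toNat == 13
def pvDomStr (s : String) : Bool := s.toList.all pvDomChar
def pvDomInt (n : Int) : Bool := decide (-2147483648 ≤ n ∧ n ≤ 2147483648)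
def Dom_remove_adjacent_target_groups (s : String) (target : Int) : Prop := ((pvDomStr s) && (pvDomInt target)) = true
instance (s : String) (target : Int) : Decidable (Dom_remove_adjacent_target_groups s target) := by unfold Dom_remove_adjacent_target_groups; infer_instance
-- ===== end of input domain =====

-- B replaces A's repeated character-level rescans by one run-length encoding followed
-- by removal passes over (char,count) runs only; the return value is proved identical.
-- (The `fuel` arguments are totality guards only; each is provably sufficient.)

-- ===== PORT A =====
-- inner `while j < len(s) and s[j] == s[i]: j += 1` (fuel = len+1 always suffices)
def pvScanJ (fuel : Nat) (l : List Char) (i : Nat) (j : Nat) : Nat :=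
  match fuel with
  | 0 => j
  | f + 1 => if j < l.length ∧ l.getD j ' ' = l.getD i ' ' then pvScanJ f l i (j + 1) else j

-- middle `while i < len(s)` loop of A: stack of kept slices plus the changed flag
def pvPassA (fuel : Nat) (l : List Char) (target : Int) (i : Nat) (stack : List (List Char))
    (changed : Bool) : List (List Char) × Bool :=
  match fuel with
  | 0 => (stack, changed)
  | f + 1 =>
    if i < l.length then
      let j := pvScanJ (l.length + 1) l i i
      let count := j - i
      if (count : Int) = target then pvPassA f l target j stack true
      else pvPassA f l target j (stack ++ [PySem.List.slice l (some (i : Int)) (some (j : Int))]) changed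
    else (stack, changed)

-- outer `while True` loop of A (a pass that removes something shortens the string,
-- so fuel = length + 1 always suffices; proved in pv_main below)
def pvLoopA (fuel : Nat) (l : List Char) (target : Int) : List Char :=
  match fuel with
  | 0 => l
  | f + 1 =>
    let r := pvPassA (l.length + 1) l target 0 [] false
    let s' := r.1.flatten
    if r.2 = false then s' else pvLoopA f s' target

def remove_adjacent_target_groups (s : String) (target : Int) : String :=
  String.ofList (pvLoopA (s.toList.length + 1) s.toList target)

-- ===== PORT B =====
-- `if runs and runs[-1][0] == c: runs[-1] = (c, runs[-1][1] + 1) else: runs.append((c, 1))`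
def pvRleStep (runs : List (Char × Nat)) (c : Char) : List (Char × Nat) :=
  match runs.getLast? with
  | some (c', k) => if c' = c then runs.dropLast ++ [(c, k + 1)] else runs ++ [(c, 1)]
  | none => runs ++ [(c, 1)]

-- merge loop body: `if merged and merged[-1][0] == c: merged[-1] = (c, merged[-1][1] + k) else: merged.append((c, k))`
def pvMergeStepL (runs : List (Char × Nat)) (p : Char × Nat) : List (Char × Nat) :=
  match runs.getLast? with
  | some (c', k') => if c' = p.1 then runs.dropLast ++ [(p.1, k' + p.2)] else runs ++ [p]
  | none => runs ++ [p]

-- `merged = []; for c, k in kept: …` of B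
def pvMergeAll (rs : List (Char × Nat)) : List (Char × Nat) := rs.foldl pvMergeStepL []

-- `while True: kept = …; if len(kept) == len(runs): break; runs = merge(kept)`
-- (each repeat strictly shortens the run list, so fuel = length + 1 always suffices)
def pvLoopB (fuel : Nat) (runs : List (Char × Nat)) (target : Int) : List (Char × Nat) :=
  match fuel with
  | 0 => runs
  | f + 1 =>
    if (runs.filter (fun r => !(decide ((r.2 : Int) = target)))).length = runs.length then runs
    else pvLoopB f (pvMergeAll (runs.filter (fun r => !(decide ((r.2 : Int) = target))))) target

def remove_adjacent_target_groups_alt (s : String) (target : Int) : String :=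
  let runs := s.toList.foldl pvRleStep []
  String.ofList (((pvLoopB (runs.length + 1) runs target).map
    (fun p => List.replicate p.2 p.1)).flatten)

-- ===== PRECONDITION & SPEC =====
def Spec_remove_adjacent_target_groups (s : String) (target : Int) (out : String) : Prop := out = remove_adjacent_target_groups_alt s target
instance (s : String) (target : Int) (out : String) : Decidable (Spec_remove_adjacent_target_groups s target out) := by unfold Spec_remove_adjacent_target_groups; infer_instance

-- ===== CLAIM (what is proved, stated in full; the proofs are below) =====
def Claim_equal_remove_adjacent_target_groups : Prop := ∀ (s : String) (target : Int), Dom_remove_adjacent_target_groups s target → Spec_remove_adjacent_target_groups s target (remove_adjacent_target_groups s target)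

-- ===== LEMMAS AND PROOFS =====

-- run/count specification helpers
def pvMS (p : Char × Nat) (acc : List (Char × Nat)) : List (Char × Nat) :=
  match acc with
  | [] => [p]
  | (c', k') :: r => if p.1 = c' then (p.1, p.2 + k') :: r else p :: (c', k') :: r

def pvM (rs : List (Char × Nat)) : List (Char × Nat) := rs.foldr pvMS []

def pvR (l : List Char) : List (Char × Nat) := pvM (l.map (fun c => (c, 1)))

def pvDecode (rs : List (Char × Nat)) : List Char :=
  (rs.map (fun p => List.replicate p.2 p.1)).flatten

theorem pvScanJ_eq (l : List Char) (i : Nat) :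
    ∀ fuel j, l.length ≤ j + fuel →
      pvScanJ fuel l i j = j + ((l.drop j).takeWhile (fun x => x == l.getD i ' ')).length := by
  intro fuel
  induction fuel with
  | zero =>
    intro j hj
    rw [List.drop_of_length_le (by omega)]
    simp [pvScanJ]
  | succ f ih =>
    intro j hj
    show (if j < l.length ∧ l.getD j ' ' = l.getD i ' ' then pvScanJ f l i (j + 1) else j) = _
    by_cases hcond : j < l.length ∧ l.getD j ' ' = l.getD i ' '
    · have hd : l.drop j = l.getD j ' ' :: l.drop (j + 1) := by
        rw [List.getD_eq_getElem?_getD, List.getElem?_eq_getElem hcond.1]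
        exact List.drop_eq_getElem_cons hcond.1
      rw [if_pos hcond, ih (j + 1) (by omega), hd, List.takeWhile_cons,
        if_pos (beq_iff_eq.mpr hcond.2), List.length_cons]
      omega
    · rw [if_neg hcond]
      by_cases hj2 : j < l.length
      · have hne : ¬ l.getD j ' ' = l.getD i ' ' := fun hc => hcond ⟨hj2, hc⟩
        have hd : l.drop j = l.getD j ' ' :: l.drop (j + 1) := by
          rw [List.getD_eq_getElem?_getD, List.getElem?_eq_getElem hj2]
          exact List.drop_eq_getElem_cons hj2
        rw [hd, List.takeWhile_cons, if_neg (fun hb => hne (eq_of_beq hb)), List.length_nil]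
        omega
      · rw [List.drop_of_length_le (by omega)]
        simp

theorem pvMS_same (c : Char) (a b : Nat) (acc : List (Char × Nat)) :
    pvMS (c, a) (pvMS (c, b) acc) = pvMS (c, a + b) acc := by
  cases acc with
  | nil => simp [pvMS]
  | cons q r =>
    obtain ⟨c', k'⟩ := q
    by_cases h : c = c' <;> simp [pvMS, h, Nat.add_assoc]

theorem pvMS_head (p : Char × Nat) (acc : List (Char × Nat)) :
    ∃ k rest, pvMS p acc = (p.1, k) :: rest ∧ p.2 ≤ k := by
  cases acc with
  | nil => exact ⟨p.2, [], by simp [pvMS], le_refl _⟩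
  | cons q r =>
    obtain ⟨c', k'⟩ := q
    by_cases h : p.1 = c'
    · exact ⟨p.2 + k', r, by simp [pvMS, h], by omega⟩
    · exact ⟨p.2, (c', k') :: r, by simp [pvMS, h], le_refl _⟩

theorem pvDecode_cons (p : Char × Nat) (rs : List (Char × Nat)) :
    pvDecode (p :: rs) = List.replicate p.2 p.1 ++ pvDecode rs := by
  simp [pvDecode]

theorem pvDecode_MS (p : Char × Nat) (acc : List (Char × Nat)) :
    pvDecode (pvMS p acc) = List.replicate p.2 p.1 ++ pvDecode acc := by
  cases acc with
  | nil => simp [pvMS, pvDecode]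
  | cons q r =>
    obtain ⟨c', k'⟩ := q
    by_cases h : p.1 = c'
    · subst h
      rw [show pvMS p ((p.1, k') :: r) = (p.1, p.2 + k') :: r from by simp [pvMS]]
      rw [pvDecode_cons, pvDecode_cons]
      show List.replicate (p.2 + k') p.1 ++ pvDecode r =
        List.replicate p.2 p.1 ++ (List.replicate k' p.1 ++ pvDecode r)
      rw [List.replicate_add, List.append_assoc]
    · simp [pvMS, h, pvDecode]

theorem pvDecode_M (rs : List (Char × Nat)) : pvDecode (pvM rs) = pvDecode rs := by
  induction rs with
  | nil => rfl
  | cons p rs ih =>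
    show pvDecode (pvMS p (pvM rs)) = pvDecode (p :: rs)
    rw [pvDecode_MS, ih, pvDecode_cons]

theorem pvDecode_map_one (l : List Char) : pvDecode (l.map (fun c => (c, 1))) = l := by
  induction l with
  | nil => rfl
  | cons c l ih => simp [pvDecode] at *; exact ih

theorem pvR_decode (l : List Char) : pvDecode (pvR l) = l := by
  rw [pvR, pvDecode_M, pvDecode_map_one]

theorem pvR_cons (c : Char) (l : List Char) : pvR (c :: l) = pvMS (c, 1) (pvR l) := rfl

theorem pvR_replicate (c : Char) (k : Nat) (xs : List Char) (hk : 1 ≤ k) :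
    pvR (List.replicate k c ++ xs) = pvMS (c, k) (pvR xs) := by
  induction k with
  | zero => omega
  | succ k ih =>
    by_cases h0 : k = 0
    · subst h0
      rw [List.replicate_one, List.singleton_append]
      exact pvR_cons c xs
    · rw [List.replicate_succ, List.cons_append, pvR_cons, ih (by omega), pvMS_same,
        Nat.add_comm 1 k]

theorem pvMS_ne_head (c : Char) (k : Nat) (xs : List Char)
    (h : ∀ d, xs.head? = some d → ¬(d = c)) :
    pvMS (c, k) (pvR xs) = (c, k) :: pvR xs := by
  cases xs with
  | nil => rfl
  | cons d t =>
    obtain ⟨k', rest, he, -⟩ := pvMS_head (d, 1) (pvR t)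
    rw [pvR_cons, he]
    have hcd : ¬(c = d) := fun hc => h d rfl hc.symm
    simp [pvMS, hcd]

theorem pv_dropWhile_head (p : Char → Bool) :
    ∀ (l : List Char) (d : Char), (l.dropWhile p).head? = some d → p d = false := by
  intro l
  induction l with
  | nil => intro d h; simp [List.dropWhile] at h
  | cons a t ih =>
    intro d h
    rw [List.dropWhile_cons] at h
    by_cases ha : p a = true
    · rw [if_pos ha] at h; exact ih d h
    · rw [if_neg ha] at h
      simp at h
      rw [← h]
      simpa using ha

-- decomposition of `l.drop i` into its leading run and the rest
theorem pv_dropWhile_drop (p : Char → Bool) (l : List Char) :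
    l.dropWhile p = l.drop (l.takeWhile p).length := by
  induction l with
  | nil => rfl
  | cons a t ih =>
    rw [List.dropWhile_cons, List.takeWhile_cons]
    by_cases h : p a = true
    · rw [if_pos h, if_pos h, List.length_cons, List.drop_succ_cons, ih]
    · rw [if_neg h, if_neg h]; rfl

theorem pvRun_decomp (l : List Char) (i : Nat) (h : i < l.length) :
    (l.drop i).takeWhile (fun x => x == l.getD i ' ') =
      List.replicate ((l.drop i).takeWhile (fun x => x == l.getD i ' ')).length (l.getD i ' ') ∧
    1 ≤ ((l.drop i).takeWhile (fun x => x == l.getD i ' ')).length ∧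
    l.drop (i + ((l.drop i).takeWhile (fun x => x == l.getD i ' ')).length) =
      (l.drop i).dropWhile (fun x => x == l.getD i ' ') ∧
    pvR (l.drop i) =
      (l.getD i ' ', ((l.drop i).takeWhile (fun x => x == l.getD i ' ')).length)
        :: pvR ((l.drop i).dropWhile (fun x => x == l.getD i ' ')) := by
  have hd : l.drop i = l.getD i ' ' :: l.drop (i + 1) := by
    rw [List.getD_eq_getElem?_getD, List.getElem?_eq_getElem h]
    exact List.drop_eq_getElem_cons h
  have htw : (l.drop i).takeWhile (fun x => x == l.getD i ' ') =
      List.replicate ((l.drop i).takeWhile (fun x => x == l.getD i ' ')).length (l.getD i ' ') := by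
    refine List.eq_replicate_iff.mpr ⟨rfl, ?_⟩
    intro x hx
    exact eq_of_beq (List.mem_takeWhile_imp (l := l.drop i) (p := fun x => x == l.getD i ' ') hx)
  have hk : 1 ≤ ((l.drop i).takeWhile (fun x => x == l.getD i ' ')).length := by
    rw [hd, List.takeWhile_cons, if_pos (beq_self_eq_true _), List.length_cons]
    omega
  have hdrop : l.drop (i + ((l.drop i).takeWhile (fun x => x == l.getD i ' ')).length) =
      (l.drop i).dropWhile (fun x => x == l.getD i ' ') := by
    rw [pv_dropWhile_drop, List.drop_drop]
  refine ⟨htw, hk, hdrop, ?_⟩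
  calc pvR (l.drop i)
      = pvR ((l.drop i).takeWhile (fun x => x == l.getD i ' ') ++
          (l.drop i).dropWhile (fun x => x == l.getD i ' ')) := by
        rw [List.takeWhile_append_dropWhile]
    _ = pvR (List.replicate ((l.drop i).takeWhile (fun x => x == l.getD i ' ')).length
          (l.getD i ' ') ++ (l.drop i).dropWhile (fun x => x == l.getD i ' ')) :=
        congrArg (fun x => pvR (x ++ (l.drop i).dropWhile (fun y => y == l.getD i ' '))) htw
    _ = pvMS (l.getD i ' ', ((l.drop i).takeWhile (fun x => x == l.getD i ' ')).length)
          (pvR ((l.drop i).dropWhile (fun x => x == l.getD i ' '))) :=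
        pvR_replicate _ _ _ hk
    _ = (l.getD i ' ', ((l.drop i).takeWhile (fun x => x == l.getD i ' ')).length)
          :: pvR ((l.drop i).dropWhile (fun x => x == l.getD i ' ')) := by
        apply pvMS_ne_head
        intro d hdh hdc
        have h2 := pv_dropWhile_head (fun x => x == l.getD i ' ') _ d hdh
        rw [hdc] at h2
        simp at h2

theorem pvPassA_char (l : List Char) (target : Int) :
    ∀ fuel i stack changed, l.length ≤ i + fuel →
      pvPassA fuel l target i stack changed =
      (stack ++ ((pvR (l.drop i)).filter
          (fun p => !(decide ((p.2 : Int) = target)))).map (fun p => List.replicate p.2 p.1),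
       changed || (pvR (l.drop i)).any (fun p => decide ((p.2 : Int) = target))) := by
  intro fuel
  induction fuel with
  | zero =>
    intro i stack changed hf
    rw [List.drop_of_length_le (by omega)]
    simp [pvPassA, pvR, pvM]
  | succ f ih =>
    intro i stack changed hf
    by_cases h : i < l.length
    · obtain ⟨htw, hk, hdrop, hR⟩ := pvRun_decomp l i h
      have hj : pvScanJ (l.length + 1) l i i =
          i + ((l.drop i).takeWhile (fun x => x == l.getD i ' ')).length :=
        pvScanJ_eq l i (l.length + 1) i (by omega)
      show (if i < l.length then
          if ((pvScanJ (l.length + 1) l i i - i : Nat) : Int) = target then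
            pvPassA f l target (pvScanJ (l.length + 1) l i i) stack true
          else pvPassA f l target (pvScanJ (l.length + 1) l i i)
            (stack ++ [PySem.List.slice l (some (i : Int)) (some ((pvScanJ (l.length + 1) l i i : Nat) : Int))]) changed
        else (stack, changed)) = _
      rw [if_pos h]
      set c := l.getD i ' ' with hc_def
      set k := ((l.drop i).takeWhile (fun x => x == c)).length with hk_def
      have hdj : l.drop (pvScanJ (l.length + 1) l i i) = (l.drop i).dropWhile (fun x => x == c) := by
        rw [hj]; exact hdrop
      by_cases hkt : ((k : Nat) : Int) = target
      · have hcnt : ((pvScanJ (l.length + 1) l i i - i : Nat) : Int) = target := by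
          rw [← hkt]; congr 1; omega
        rw [if_pos hcnt, ih _ stack true (by omega), hR, hdj,
          List.filter_cons, List.any_cons, decide_eq_true hkt]
        simp
      · have hcnt : ¬(((pvScanJ (l.length + 1) l i i - i : Nat) : Int) = target) := by
          intro hx; apply hkt; rw [← hx]; congr 1; omega
        have hslice : PySem.List.slice l (some (i : Int))
            (some ((pvScanJ (l.length + 1) l i i : Nat) : Int)) = List.replicate k c := by
          rw [PySem.List.slice_natCast]
          have h2 : pvScanJ (l.length + 1) l i i - i = k := by omega
          rw [h2, ← htw]
          have hsplit : (l.drop i).takeWhile (fun x => x == c) ++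
              (l.drop i).dropWhile (fun x => x == c) = l.drop i :=
            List.takeWhile_append_dropWhile
          calc (l.drop i).take k
              = ((l.drop i).takeWhile (fun x => x == c) ++
                  (l.drop i).dropWhile (fun x => x == c)).take k := by rw [hsplit]
            _ = (l.drop i).takeWhile (fun x => x == c) := List.take_left' rfl
        rw [if_neg hcnt, ih _ _ changed (by omega), hR, hdj, hslice,
          List.filter_cons, List.any_cons, decide_eq_false hkt]
        simp [List.append_assoc]
    · rw [List.drop_of_length_le (by omega)]
      show (if i < l.length then _ else (stack, changed)) = _
      rw [if_neg h]
      simp [pvR, pvM]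

theorem pvDecode_length (rs : List (Char × Nat)) :
    (pvDecode rs).length = (rs.map Prod.snd).sum := by
  induction rs with
  | nil => rfl
  | cons p rs ih => rw [pvDecode_cons]; simp [ih]

theorem pv_sum_filter_le (q : Char × Nat → Bool) (rs : List (Char × Nat)) :
    ((rs.filter q).map Prod.snd).sum ≤ (rs.map Prod.snd).sum := by
  induction rs with
  | nil => simp
  | cons p rs ih =>
    rw [List.filter_cons]
    by_cases h : q p <;> simp [h] <;> omega

theorem pv_sum_filter_lt (q : Char × Nat → Bool) (rs : List (Char × Nat))
    (hpos : ∀ p ∈ rs, 1 ≤ p.2) (hex : ∃ p ∈ rs, ¬(q p = true)) :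
    ((rs.filter q).map Prod.snd).sum < (rs.map Prod.snd).sum := by
  induction rs with
  | nil => obtain ⟨p, hp, -⟩ := hex; simp at hp
  | cons p rs ih =>
    rw [List.filter_cons]
    by_cases h : q p = true
    · obtain ⟨p', hp', hq'⟩ := hex
      rcases List.mem_cons.mp hp' with he | hm
      · exact absurd (he ▸ h) hq'
      · have := ih (fun x hx => hpos x (List.mem_cons_of_mem _ hx)) ⟨p', hm, hq'⟩
        simp [h]; omega
    · have h1 := pv_sum_filter_le q rs
      have h2 := hpos p (List.mem_cons_self)
      simp [h]; omega

theorem pvMS_pos (p : Char × Nat) (acc : List (Char × Nat)) (hp : 1 ≤ p.2)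
    (hacc : ∀ q ∈ acc, 1 ≤ q.2) : ∀ q ∈ pvMS p acc, 1 ≤ q.2 := by
  cases acc with
  | nil => intro q hq; simp [pvMS] at hq; subst hq; exact hp
  | cons a r =>
    obtain ⟨c', k'⟩ := a
    by_cases h : p.1 = c' <;> intro q hq <;> obtain ⟨q1, q2⟩ := q <;> simp [pvMS, h] at hq
    · rcases hq with he | hm
      · rw [he.2]; omega
      · exact hacc (q1, q2) (List.mem_cons_of_mem _ hm)
    · rcases hq with he | he | hm
      · have h2 := hp; rw [← he] at h2; simpa using h2
      · rw [he.2]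
        have := hacc (c', k') List.mem_cons_self
        simpa using this
      · exact hacc (q1, q2) (List.mem_cons_of_mem _ hm)

theorem pvR_pos (l : List Char) : ∀ q ∈ pvR l, 1 ≤ q.2 := by
  induction l with
  | nil => intro q hq; simp [pvR, pvM] at hq
  | cons c t ih =>
    rw [pvR_cons]
    exact pvMS_pos (c, 1) (pvR t) (le_refl 1) ih

theorem pvPassA_len (l : List Char) (target : Int)
    (h : (pvPassA (l.length + 1) l target 0 [] false).2 = true) :
    (pvPassA (l.length + 1) l target 0 [] false).1.flatten.length < l.length := by
  rw [pvPassA_char l target (l.length + 1) 0 [] false (by omega)] at h ⊢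
  simp only [List.drop_zero, Bool.false_or] at h ⊢
  obtain ⟨p, hp, hq⟩ := List.any_eq_true.mp h
  have hlen : (((pvR l).filter (fun p => !(decide ((p.2 : Int) = target)))).map
      (fun p => List.replicate p.2 p.1)).flatten.length =
      (pvDecode ((pvR l).filter (fun p => !(decide ((p.2 : Int) = target))))).length := rfl
  rw [List.nil_append, hlen, pvDecode_length]
  have hL : l.length = (pvDecode (pvR l)).length := by rw [pvR_decode]
  rw [hL, pvDecode_length]
  apply pv_sum_filter_lt _ _ (pvR_pos l)
  exact ⟨p, hp, by simp [hq]⟩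

theorem pvMergeStepL_len (acc : List (Char × Nat)) (p : Char × Nat) :
    (pvMergeStepL acc p).length ≤ acc.length + 1 := by
  unfold pvMergeStepL
  cases h : acc.getLast? with
  | none => simp
  | some q =>
    obtain ⟨c', k'⟩ := q
    by_cases hc : c' = p.1 <;> simp [hc, List.length_dropLast]

theorem pvMergeFold_len (rs : List (Char × Nat)) :
    ∀ acc : List (Char × Nat), (rs.foldl pvMergeStepL acc).length ≤ acc.length + rs.length := by
  induction rs with
  | nil => intro acc; simp
  | cons p rs ih =>
    intro acc
    rw [List.foldl_cons]
    have h1 := ih (pvMergeStepL acc p)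
    have h2 := pvMergeStepL_len acc p
    simp only [List.length_cons]
    omega

-- B's last-element update, seen from the reversed accumulator
def pvPush (a : List (Char × Nat)) (p : Char × Nat) : List (Char × Nat) :=
  match a with
  | [] => [p]
  | (c', k') :: r => if c' = p.1 then (p.1, k' + p.2) :: r else p :: (c', k') :: r

theorem pvMergeStepL_push (acc : List (Char × Nat)) (p : Char × Nat) :
    pvMergeStepL acc p = (pvPush acc.reverse p).reverse := by
  induction acc using List.reverseRecOn with
  | nil => rfl
  | append_singleton as q _ =>
    obtain ⟨c', k'⟩ := q
    by_cases hc : c' = p.1 <;>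
      simp [pvMergeStepL, pvPush, hc]

theorem pv_foldl_MSL (rs : List (Char × Nat)) :
    ∀ acc, rs.foldl pvMergeStepL acc = (rs.foldl pvPush acc.reverse).reverse := by
  induction rs with
  | nil => intro acc; simp
  | cons p rs ih =>
    intro acc
    rw [List.foldl_cons, List.foldl_cons, ih, pvMergeStepL_push, List.reverse_reverse]

theorem pvRleStep_eq (runs : List (Char × Nat)) (c : Char) :
    pvRleStep runs c = pvMergeStepL runs (c, 1) := by
  unfold pvRleStep pvMergeStepL
  rfl

theorem pvPush_same (a : List (Char × Nat)) (c : Char) (x y : Nat) :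
    pvPush (pvPush a (c, x)) (c, y) = pvPush a (c, x + y) := by
  cases a with
  | nil => simp [pvPush]
  | cons q r =>
    obtain ⟨c0, k0⟩ := q
    by_cases h : c0 = c <;> simp [pvPush, h, Nat.add_assoc]

theorem pv_foldl_push_M (rs : List (Char × Nat)) :
    ∀ a, rs.foldl pvPush a = (pvM rs).foldl pvPush a := by
  induction rs with
  | nil => intro a; rfl
  | cons p rs ih =>
    intro a
    rw [List.foldl_cons, ih]
    show (pvM rs).foldl pvPush (pvPush a p) = (pvM (p :: rs)).foldl pvPush a
    have hm : pvM (p :: rs) = pvMS p (pvM rs) := rfl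
    rw [hm]
    cases hM : pvM rs with
    | nil => simp [pvMS]
    | cons q r =>
      obtain ⟨c', k'⟩ := q
      by_cases hpc : p.1 = c'
      · rw [show pvMS p ((c', k') :: r) = (p.1, p.2 + k') :: r from by simp [pvMS, hpc]]
        rw [List.foldl_cons, List.foldl_cons]
        congr 1
        rw [← hpc]
        have h2 : pvPush (pvPush a (p.1, p.2)) (p.1, k') = pvPush a (p.1, p.2 + k') :=
          pvPush_same a p.1 p.2 k'
        simpa using h2
      · rw [show pvMS p ((c', k') :: r) = p :: (c', k') :: r from by simp [pvMS, hpc]]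
        simp [List.foldl_cons]

theorem pvMS_chain (p : Char × Nat) (acc : List (Char × Nat))
    (h : acc.IsChain (fun x y => x.1 ≠ y.1)) : (pvMS p acc).IsChain (fun x y => x.1 ≠ y.1) := by
  cases acc with
  | nil => exact List.isChain_singleton p
  | cons q r =>
    obtain ⟨c', k'⟩ := q
    by_cases hpc : p.1 = c'
    · rw [show pvMS p ((c', k') :: r) = (p.1, p.2 + k') :: r from by simp [pvMS, hpc]]
      cases r with
      | nil => exact List.isChain_singleton _
      | cons q2 t =>
        rw [List.isChain_cons_cons] at h ⊢
        exact ⟨by rw [hpc]; exact h.1, h.2⟩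
    · rw [show pvMS p ((c', k') :: r) = p :: (c', k') :: r from by simp [pvMS, hpc]]
      exact List.isChain_cons_cons.mpr ⟨hpc, h⟩

theorem pvM_chain (rs : List (Char × Nat)) : (pvM rs).IsChain (fun x y => x.1 ≠ y.1) := by
  induction rs with
  | nil => exact .nil
  | cons p rs ih => exact pvMS_chain p (pvM rs) ih

theorem pv_foldl_push_rev (rs : List (Char × Nat)) :
    rs.IsChain (fun x y => x.1 ≠ y.1) →
    ∀ a, (∀ p q, rs.head? = some p → a.head? = some q → p.1 ≠ q.1) →
      rs.foldl pvPush a = rs.reverse ++ a := by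
  induction rs with
  | nil => intro _ a _; simp
  | cons p rs ih =>
    intro hc a hcond
    rw [List.foldl_cons]
    have hpush : pvPush a p = p :: a := by
      cases a with
      | nil => rfl
      | cons q t =>
        obtain ⟨c0, k0⟩ := q
        have hne : p.1 ≠ c0 := hcond p (c0, k0) rfl rfl
        have h2 : ¬(c0 = p.1) := fun hh => hne hh.symm
        simp [pvPush, h2]
    rw [hpush]
    have hch : rs.IsChain (fun x y => x.1 ≠ y.1) := by
      cases rs with
      | nil => exact .nil
      | cons b t => exact (List.isChain_cons_cons.mp hc).2
    have hcnd : ∀ p' q', rs.head? = some p' → (p :: a).head? = some q' → p'.1 ≠ q'.1 := by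
      intro p' q' hp' hq'
      have hq : p = q' := by simpa using hq'
      subst hq
      cases rs with
      | nil => simp at hp'
      | cons b t =>
        have hb : b = p' := by simpa using hp'
        subst hb
        exact ((List.isChain_cons_cons.mp hc).1).symm
    rw [ih hch (p :: a) hcnd, List.reverse_cons, List.append_assoc]
    rfl

theorem pv_foldl_MSL_M (rs : List (Char × Nat)) : rs.foldl pvMergeStepL [] = pvM rs := by
  rw [pv_foldl_MSL rs [], List.reverse_nil, pv_foldl_push_M,
    pv_foldl_push_rev (pvM rs) (pvM_chain rs) [] (by intro p q _ hq; simp at hq)]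
  simp

theorem pv_rle_eq_R (l : List Char) : l.foldl pvRleStep [] = pvR l := by
  have hfn : pvRleStep = fun acc c => pvMergeStepL acc (c, 1) := by
    funext acc c; exact pvRleStep_eq acc c
  have h1 : l.foldl pvRleStep [] = (l.map (fun c => (c, 1))).foldl pvMergeStepL [] := by
    rw [List.foldl_map, hfn]
  rw [h1, pv_foldl_MSL_M]
  rfl

theorem pvR_decode_M (rs : List (Char × Nat)) (hpos : ∀ p ∈ rs, 1 ≤ p.2) :
    pvR (pvDecode rs) = pvM rs := by
  induction rs with
  | nil => rfl
  | cons p rs ih =>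
    have hp : 1 ≤ p.2 := hpos p List.mem_cons_self
    rw [pvDecode_cons, pvR_replicate _ _ _ hp,
      ih (fun q hq => hpos q (List.mem_cons_of_mem _ hq))]
    rfl

theorem pv_filter_len_eq {α : Type} (q : α → Bool) (rs : List α)
    (h : (rs.filter q).length = rs.length) : rs.filter q = rs := by
  induction rs with
  | nil => rfl
  | cons a t ih =>
    rw [List.filter_cons] at h ⊢
    by_cases hq : q a
    · simp only [hq, if_true, List.length_cons] at h
      rw [if_pos hq, ih (by omega)]
    · rw [if_neg hq] at h
      have := List.length_filter_le q t
      simp at h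
      omega

theorem pvLoopB_fuel (target : Int) :
    ∀ f1 f2 rs, rs.length < f1 → rs.length < f2 →
      pvLoopB f1 rs target = pvLoopB f2 rs target := by
  intro f1
  induction f1 with
  | zero => intro f2 rs h1 h2; omega
  | succ f ih =>
    intro f2 rs h1 h2
    cases f2 with
    | zero => omega
    | succ g =>
      show (if (rs.filter (fun r => !(decide ((r.2 : Int) = target)))).length = rs.length then rs
          else pvLoopB f (pvMergeAll (rs.filter (fun r => !(decide ((r.2 : Int) = target))))) target) =
        (if (rs.filter (fun r => !(decide ((r.2 : Int) = target)))).length = rs.length then rs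
          else pvLoopB g (pvMergeAll (rs.filter (fun r => !(decide ((r.2 : Int) = target))))) target)
      by_cases hcond : (rs.filter (fun r => !(decide ((r.2 : Int) = target)))).length = rs.length
      · rw [if_pos hcond, if_pos hcond]
      · rw [if_neg hcond, if_neg hcond]
        apply ih
        · have ha := pvMergeFold_len (rs.filter (fun r => !(decide ((r.2 : Int) = target)))) []
          have hb := List.length_filter_le (fun r => !(decide ((r.2 : Int) = target))) rs
          simp only [List.length_nil, Nat.zero_add] at ha
          show (pvMergeAll _).length < f
          unfold pvMergeAll
          omega
        · have ha := pvMergeFold_len (rs.filter (fun r => !(decide ((r.2 : Int) = target)))) []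
          have hb := List.length_filter_le (fun r => !(decide ((r.2 : Int) = target))) rs
          simp only [List.length_nil, Nat.zero_add] at ha
          show (pvMergeAll _).length < g
          unfold pvMergeAll
          omega

theorem pv_main (l : List Char) (target : Int) :
    ∀ n, l.length < n →
      pvLoopA n l target = pvDecode (pvLoopB ((pvR l).length + 1) (pvR l) target) := by
  have H : ∀ n (l : List Char), l.length < n →
      pvLoopA n l target = pvDecode (pvLoopB ((pvR l).length + 1) (pvR l) target) := by
    intro n
    induction n with
    | zero => intro l hl; omega
    | succ n ih =>
      intro l hl
      have hpass := pvPassA_char l target (l.length + 1) 0 [] false (by omega)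
      simp only [List.drop_zero, Bool.false_or, List.nil_append] at hpass
      show (let r := pvPassA (l.length + 1) l target 0 [] false;
        let s' := r.1.flatten;
        if r.2 = false then s' else pvLoopA n s' target) = _
      by_cases hany : (pvR l).any (fun p => decide ((p.2 : Int) = target)) = true
      · -- a run of length target exists: both sides take another pass
        have hr2 : (pvPassA (l.length + 1) l target 0 [] false).2 = true := by
          rw [hpass]; exact hany
        have hlt : ((((pvR l).filter (fun r => !(decide ((r.2 : Int) = target)))).map
            (fun p => List.replicate p.2 p.1)).flatten).length < l.length := by
          have h3 := pvPassA_len l target hr2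
          rw [hpass] at h3
          exact h3
        have hne : ¬(((pvR l).filter (fun r => !(decide ((r.2 : Int) = target)))).length =
            (pvR l).length) := by
          intro hcc
          have hall := List.filter_eq_self.mp (pv_filter_len_eq _ _ hcc)
          have hfal : (pvR l).any (fun p => decide ((p.2 : Int) = target)) = false := by
            apply List.any_eq_false.mpr
            intro p hp
            have := hall p hp
            simpa using this
          rw [hfal] at hany
          exact absurd hany (by simp)
        have hmerge : pvR ((((pvR l).filter (fun r => !(decide ((r.2 : Int) = target)))).map
            (fun p => List.replicate p.2 p.1)).flatten) =
            pvM ((pvR l).filter (fun r => !(decide ((r.2 : Int) = target)))) := by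
          exact pvR_decode_M _ (fun q hq => pvR_pos l q (List.mem_of_mem_filter hq))
        have hlen2 : (pvM ((pvR l).filter (fun r => !(decide ((r.2 : Int) = target))))).length <
            (pvR l).length := by
          have ha := pvMergeFold_len ((pvR l).filter (fun r => !(decide ((r.2 : Int) = target)))) []
          have hb := List.length_filter_le (fun r => !(decide ((r.2 : Int) = target))) (pvR l)
          simp only [List.length_nil, Nat.zero_add] at ha
          rw [← pv_foldl_MSL_M]
          omega
        have hB : pvLoopB ((pvR l).length + 1) (pvR l) target =
            pvLoopB ((pvM ((pvR l).filter (fun r => !(decide ((r.2 : Int) = target))))).length + 1)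
              (pvM ((pvR l).filter (fun r => !(decide ((r.2 : Int) = target))))) target := by
          show (if ((pvR l).filter (fun r => !(decide ((r.2 : Int) = target)))).length =
              (pvR l).length then pvR l
            else pvLoopB ((pvR l).length)
              (pvMergeAll ((pvR l).filter (fun r => !(decide ((r.2 : Int) = target))))) target) = _
          rw [if_neg hne,
            show pvMergeAll ((pvR l).filter (fun r => !(decide ((r.2 : Int) = target)))) =
              pvM ((pvR l).filter (fun r => !(decide ((r.2 : Int) = target)))) from
              pv_foldl_MSL_M _]
          exact pvLoopB_fuel target _ _ _ hlen2 (by omega)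
        simp only [hpass]
        rw [if_neg (by rw [hany]; simp)]
        rw [ih _ (by omega), hmerge, hB]
      · -- no run of length target: both sides stop
        have hfalse : (pvR l).any (fun p => decide ((p.2 : Int) = target)) = false := by
          simpa using hany
        have hkeep : (pvR l).filter (fun r => !(decide ((r.2 : Int) = target))) = pvR l := by
          apply List.filter_eq_self.mpr
          intro p hp
          have := List.any_eq_false.mp hfalse p hp
          simpa using this
        simp only [hpass]
        rw [if_pos hfalse]
        have hB : pvLoopB ((pvR l).length + 1) (pvR l) target = pvR l := by
          show (if ((pvR l).filter (fun r => !(decide ((r.2 : Int) = target)))).length =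
              (pvR l).length then pvR l
            else pvLoopB ((pvR l).length)
              (pvMergeAll ((pvR l).filter (fun r => !(decide ((r.2 : Int) = target))))) target) = _
          rw [if_pos (by rw [hkeep])]
        rw [hB, hkeep]
        rfl
  exact fun n hn => H n l hn

-- ===== VERDICT (by name: the statement is the Claim_ definition above) =====
theorem remove_adjacent_target_groups_spec : Claim_equal_remove_adjacent_target_groups := by
  unfold Claim_equal_remove_adjacent_target_groups
  intro s target _
  unfold Spec_remove_adjacent_target_groups
  unfold remove_adjacent_target_groups remove_adjacent_target_groups_alt
  rw [pv_main s.toList target (s.toList.length + 1) (by omega), pv_rle_eq_R]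
  rfl
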